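-- pv_equiv track=rewrite | github.com/NaooyOki/YasouReportReading | utility.py | trimPosList
-- ===== SOURCE A (Python) =====
-- def trimPosList(lst:list(), skip:int = 2) -> list():
--     """
--     隣接する直線を一つに束ねる。表の罫線は太いため、直線検出では複数の直線として得られるため。
--     @param list:list(int)  線の位置
--     @return list:list(start:int, end:int)  束ねた線の位置(始点と終点のタプル)
--     """
--     trimed = []
--     prev = lst[0]
--     start = prev
--     for pos in lst:
--         if ((pos - prev) > skip):
--             trimed.append((start, prev))
--             start = pos
--         prev = pos
--     trimed.append((start, prev))
--
--     return(trimed)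
-- ===== SOURCE B (Python) =====
-- def trimPosList(lst: list(), skip: int = 2) -> list():
--     """Bundle adjacent line positions into (start, end) ranges via an explicit
--     boundary-index table: first collect segment-break indices, then pair
--     consecutive boundaries directly."""
--     n = len(lst)
--     boundaries = [0]
--     for i in range(1, n):
--         if lst[i] - lst[i - 1] > skip:
--             boundaries.append(i)
--     boundaries.append(n)
--     return [(lst[boundaries[j]], lst[boundaries[j + 1] - 1])
--             for j in range(len(boundaries) - 1)]
-- ===== Notes on version B (the rewrite author's own statement) =====
-- stated objective: alternative
-- what changed: B replaces A's inline prev/start accumulator loop with a two-phase boundary-index table: one pass collects the break indices where consecutive positions differ by more than skip, bracketed by 0 and the length, then a comprehension pairs consecutive boundaries, indexing segment endpoints directly.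
-- intended difference: For negative skip on a nonempty list, A's loop compares the first position with itself (0 > skip fires) and prepends a spurious degenerate pair made of the first position twice; B compares only genuinely adjacent positions and omits it, which is the intended grouping. — e.g. on trimPosList([0], -1): A returns [(0, 0), (0, 0)], B returns [(0, 0)]
import Mathlib
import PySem

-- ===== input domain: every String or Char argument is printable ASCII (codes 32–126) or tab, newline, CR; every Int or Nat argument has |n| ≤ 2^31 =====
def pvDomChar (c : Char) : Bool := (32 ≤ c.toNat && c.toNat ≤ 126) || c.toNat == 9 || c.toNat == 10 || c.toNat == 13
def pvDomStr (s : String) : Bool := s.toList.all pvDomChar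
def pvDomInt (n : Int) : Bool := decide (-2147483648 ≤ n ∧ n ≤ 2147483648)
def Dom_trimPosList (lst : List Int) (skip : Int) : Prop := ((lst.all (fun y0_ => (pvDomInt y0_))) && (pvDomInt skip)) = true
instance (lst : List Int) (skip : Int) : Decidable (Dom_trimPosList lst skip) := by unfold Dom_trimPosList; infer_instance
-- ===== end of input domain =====

-- B bundles adjacent positions via an explicit boundary-index table (collect break
-- indices, then pair consecutive boundaries); same O(n) cost, different decomposition.

-- ===== PORT A =====
-- state = (trimed, prev, start); the Python loop over lst starts at lst[0] itself
def trimPosList (lst : List Int) (skip : Int) : List (Int × Int) :=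
  match lst with
  | [] => []  -- Python raises IndexError reading the first element; excluded by Pre_
  | p0 :: _ =>
    let s := lst.foldl
      (fun (st : List (Int × Int) × Int × Int) pos =>
        if pos - st.2.1 > skip then (st.1 ++ [(st.2.2, st.2.1)], pos, pos)
        else (st.1, pos, st.2.2))
      ([], p0, p0)
    s.1 ++ [(s.2.2, s.2.1)]

-- ===== PORT B =====
-- transliteration of Source B: boundary table, then pair consecutive boundaries.
-- all list indices are in range on the inputs admitted by Pre_, so pyGetD _ _ 0 is exact
def trimPosList_alt (lst : List Int) (skip : Int) : List (Int × Int) :=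
  let n : Int := lst.length
  let bs := (PySem.List.pyRange 1 n 1).foldl
      (fun bs i =>
        if PySem.List.pyGetD lst i 0 - PySem.List.pyGetD lst (i - 1) 0 > skip
        then bs ++ [i] else bs)
      [(0 : Int)]
  let bs := bs ++ [n]
  (PySem.List.pyRange 0 ((bs.length : Int) - 1) 1).map
    (fun j => (PySem.List.pyGetD lst (PySem.List.pyGetD bs j 0) 0,
               PySem.List.pyGetD lst (PySem.List.pyGetD bs (j + 1) 0 - 1) 0))

-- ===== PRECONDITION & SPEC =====
-- Pre_ excludes only the empty list, on which Python A raises IndexError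
def Pre_trimPosList (lst : List Int) (skip : Int) : Prop := lst ≠ []
instance (lst : List Int) (skip : Int) : Decidable (Pre_trimPosList lst skip) := by
  unfold Pre_trimPosList; infer_instance
def pvWitness_trimPosList : List Int × Int := ([1, 2, 10], 2)

-- For negative skip on a nonempty list, A's loop compares the first position with itself
-- (0 > skip fires) and prepends a spurious degenerate pair made of the first position
-- twice; B compares only genuinely adjacent positions and omits it, the intended grouping.
def D_trimPosList (lst : List Int) (skip : Int) : Prop := lst ≠ [] ∧ skip < 0
instance (lst : List Int) (skip : Int) : Decidable (D_trimPosList lst skip) := by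
  unfold D_trimPosList; infer_instance

def Spec_trimPosList (lst : List Int) (skip : Int) (out : List (Int × Int)) : Prop :=
  ¬ D_trimPosList lst skip → out = trimPosList_alt lst skip
instance (lst : List Int) (skip : Int) (out : List (Int × Int)) : Decidable (Spec_trimPosList lst skip out) := by
  unfold Spec_trimPosList; infer_instance

def pvDiffWitness_trimPosList : List Int × Int := ([0], -1)
def pvDiffWitnessOut_trimPosList : (List (Int × Int)) × (List (Int × Int)) :=
  ([(0, 0), (0, 0)], [(0, 0)])

-- ===== CLAIM (what is proved, stated in full; the proofs are below) =====
def Claim_unchanged_trimPosList : Prop := ∀ (lst : List Int) (skip : Int), Dom_trimPosList lst skip → Pre_trimPosList lst skip → Spec_trimPosList lst skip (trimPosList lst skip)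
def Claim_changed_trimPosList : Prop := Dom_trimPosList (pvDiffWitness_trimPosList.1) (pvDiffWitness_trimPosList.2) ∧ Pre_trimPosList (pvDiffWitness_trimPosList.1) (pvDiffWitness_trimPosList.2) ∧ D_trimPosList (pvDiffWitness_trimPosList.1) (pvDiffWitness_trimPosList.2) ∧ trimPosList (pvDiffWitness_trimPosList.1) (pvDiffWitness_trimPosList.2) = pvDiffWitnessOut_trimPosList.1 ∧ trimPosList_alt (pvDiffWitness_trimPosList.1) (pvDiffWitness_trimPosList.2) = pvDiffWitnessOut_trimPosList.2 ∧ pvDiffWitnessOut_trimPosList.1 ≠ pvDiffWitnessOut_trimPosList.2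
def Claim_exact_trimPosList : Prop := ∀ (lst : List Int) (skip : Int), Dom_trimPosList lst skip → Pre_trimPosList lst skip → D_trimPosList lst skip → trimPosList lst skip ≠ trimPosList_alt lst skip

-- ===== LEMMAS AND PROOFS =====

-- reference: the segment decomposition of `rest`, current segment started at `start`,
-- last seen position `prev`
def segs (skip start prev : Int) : List Int → List (Int × Int)
  | [] => [(start, prev)]
  | p :: rest =>
    if p - prev > skip then (start, prev) :: segs skip p p rest
    else segs skip start p rest

-- break indices of the suffix `rest` of the full list, `rest` starting at index k,
-- previous element `prev`
def gapsFrom (skip : Int) (k prev : Int) : List Int → List Int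
  | [] => []
  | p :: rest =>
    if p - prev > skip then k :: gapsFrom skip (k + 1) p rest
    else gapsFrom skip (k + 1) p rest

-- consecutive-boundary pairing
def pairs (l : List Int) : List Int → List (Int × Int)
  | b0 :: b1 :: bs =>
    (PySem.List.pyGetD l b0 0, PySem.List.pyGetD l (b1 - 1) 0) :: pairs l (b1 :: bs)
  | _ => []

theorem A_fold (skip : Int) (rest : List Int) : ∀ (acc : List (Int × Int)) (prev start : Int),
    (let s := rest.foldl
      (fun (st : List (Int × Int) × Int × Int) pos =>
        if pos - st.2.1 > skip then (st.1 ++ [(st.2.2, st.2.1)], pos, pos)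
        else (st.1, pos, st.2.2))
      (acc, prev, start)
     s.1 ++ [(s.2.2, s.2.1)]) = acc ++ segs skip start prev rest := by
  induction rest with
  | nil => intro acc prev start; simp [segs]
  | cons p rest ih =>
    intro acc prev start
    simp only [List.foldl_cons, segs]
    by_cases h : p - prev > skip
    · simp only [if_pos h]
      rw [ih]
      simp
    · simp only [if_neg h]
      rw [ih]

theorem filter_pyRange (l : List Int) (skip : Int) : ∀ (rest : List Int) (k : Nat) (prev : Int),
    l.drop k = rest → 1 ≤ k → l.getD (k - 1) 0 = prev →
    (PySem.List.pyRange (k : Int) (l.length : Int) 1).filter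
        (fun i => PySem.List.pyGetD l i 0 - PySem.List.pyGetD l (i - 1) 0 > skip)
      = gapsFrom skip (k : Int) prev rest := by
  intro rest
  induction rest with
  | nil =>
    intro k prev hdrop _ _
    have hk : l.length ≤ k := by
      by_contra h
      have := List.drop_eq_nil_iff.mp hdrop
      omega
    rw [PySem.List.pyRange_one_eq_nil (by exact_mod_cast hk)]
    simp [gapsFrom]
  | cons p rest ih =>
    intro k prev hdrop hk1 hprev
    have hklt : k < l.length := by
      by_contra h
      rw [List.drop_eq_nil_iff.mpr (by omega)] at hdrop
      exact (List.cons_ne_nil _ _) hdrop.symm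
    have hlk : l.getD k 0 = p := by
      have h0 : (l.drop k)[0]? = l[k + 0]? := List.getElem?_drop
      rw [hdrop] at h0
      simp only [List.getElem?_cons_zero, Nat.add_zero] at h0
      simp [List.getD_eq_getElem?_getD, ← h0]
    have hdrop' : l.drop (k + 1) = rest := by
      have : l.drop (k + 1) = (l.drop k).drop 1 := by
        rw [List.drop_drop]
      rw [this, hdrop]; simp
    rw [PySem.List.pyRange_one_cons (by exact_mod_cast hklt)]
    rw [List.filter_cons]
    have hget1 : PySem.List.pyGetD l (k : Int) 0 = p := by
      rw [PySem.List.pyGetD_natCast]; exact hlk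
    have hget0 : PySem.List.pyGetD l ((k : Int) - 1) 0 = prev := by
      have : (k : Int) - 1 = ((k - 1 : Nat) : Int) := by omega
      rw [this, PySem.List.pyGetD_natCast]; exact hprev
    have hcast : (k : Int) + 1 = ((k + 1 : Nat) : Int) := by push_cast; ring
    by_cases h : p - prev > skip
    · rw [if_pos (by simp [hget1, hget0, h])]
      simp only [gapsFrom, if_pos h, hcast]
      rw [ih (k + 1) p hdrop' (by omega) (by simpa using hlk)]
    · rw [if_neg (by simp [hget1, hget0, h])]
      simp only [gapsFrom, if_neg h, hcast]
      exact ih (k + 1) p hdrop' (by omega) (by simpa using hlk)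

theorem mapRange_nat (l : List Int) : ∀ (bs : List Int),
    (List.range (bs.length - 1)).map
        (fun j => (PySem.List.pyGetD l (bs.getD j 0) 0,
                   PySem.List.pyGetD l (bs.getD (j + 1) 0 - 1) 0))
      = pairs l bs := by
  intro bs
  induction bs with
  | nil => simp [pairs]
  | cons b0 tl ih =>
    cases tl with
    | nil => simp [pairs]
    | cons b1 tl' =>
      have h : (b0 :: b1 :: tl').length - 1 = tl'.length + 1 := by simp
      rw [h, List.range_succ_eq_map]
      simp only [List.map_cons, List.map_map, pairs]
      congr 1


theorem mapRange (l : List Int) (bs : List Int) :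
    (PySem.List.pyRange 0 ((bs.length : Int) - 1) 1).map
        (fun j => (PySem.List.pyGetD l (PySem.List.pyGetD bs j 0) 0,
                   PySem.List.pyGetD l (PySem.List.pyGetD bs (j + 1) 0 - 1) 0))
      = pairs l bs := by
  rw [PySem.List.pyRange_one]
  have h : ((bs.length : Int) - 1 - 0).toNat = bs.length - 1 := by omega
  rw [h, ← mapRange_nat l bs, List.map_map]
  apply List.map_congr_left
  intro j _
  show (PySem.List.pyGetD l (PySem.List.pyGetD bs ((0 : Int) + (j : Int)) 0) 0,
        PySem.List.pyGetD l (PySem.List.pyGetD bs ((0 : Int) + (j : Int) + 1) 0 - 1) 0) = _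
  rw [show (0 : Int) + (j : Int) = (j : Int) by ring]
  rw [show (j : Int) + 1 = ((j + 1 : Nat) : Int) by push_cast; ring]
  rw [PySem.List.pyGetD_natCast, PySem.List.pyGetD_natCast]

theorem core (l : List Int) (skip : Int) : ∀ (rest : List Int) (k s : Nat) (start prev : Int),
    l.drop k = rest → 1 ≤ k → k ≤ l.length → s < l.length →
    l.getD s 0 = start → l.getD (k - 1) 0 = prev →
    pairs l ((s : Int) :: (gapsFrom skip (k : Int) prev rest ++ [(l.length : Int)]))
      = segs skip start prev rest := by
  intro rest
  induction rest with
  | nil =>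
    intro k s start prev hdrop hk1 hklen hs hstart hprev
    have hk : l.length ≤ k := by
      by_contra h
      have := List.drop_eq_nil_iff.mp hdrop
      omega
    have hkeq : k = l.length := by omega
    simp only [gapsFrom, List.nil_append, pairs, segs]
    have h1 : PySem.List.pyGetD l (s : Int) 0 = start := by
      rw [PySem.List.pyGetD_natCast]; exact hstart
    have h2 : PySem.List.pyGetD l ((l.length : Int) - 1) 0 = prev := by
      have : (l.length : Int) - 1 = ((l.length - 1 : Nat) : Int) := by omega
      rw [this, PySem.List.pyGetD_natCast, ← hkeq]; exact hprev
    rw [h1, h2]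
  | cons p rest ih =>
    intro k s start prev hdrop hk1 hklen hs hstart hprev
    have hklt : k < l.length := by
      by_contra h
      rw [List.drop_eq_nil_iff.mpr (by omega)] at hdrop
      exact (List.cons_ne_nil _ _) hdrop.symm
    have hlk : l.getD k 0 = p := by
      have h0 : (l.drop k)[0]? = l[k + 0]? := List.getElem?_drop
      rw [hdrop] at h0
      simp only [List.getElem?_cons_zero, Nat.add_zero] at h0
      simp [List.getD_eq_getElem?_getD, ← h0]
    have hdrop' : l.drop (k + 1) = rest := by
      have : l.drop (k + 1) = (l.drop k).drop 1 := by rw [List.drop_drop]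
      rw [this, hdrop]; simp
    have hcast : (k : Int) + 1 = ((k + 1 : Nat) : Int) := by push_cast; ring
    simp only [gapsFrom, segs]
    by_cases h : p - prev > skip
    · simp only [if_pos h]
      rw [List.cons_append, pairs]
      have h1 : PySem.List.pyGetD l (s : Int) 0 = start := by
        rw [PySem.List.pyGetD_natCast]; exact hstart
      have h2 : PySem.List.pyGetD l ((k : Int) - 1) 0 = prev := by
        have : (k : Int) - 1 = ((k - 1 : Nat) : Int) := by omega
        rw [this, PySem.List.pyGetD_natCast]; exact hprev
      rw [h1, h2, hcast,
        ih (k + 1) k p p hdrop' (by omega) (by omega) hklt hlk (by simpa using hlk)]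
    · simp only [if_neg h]
      rw [hcast, ih (k + 1) s start p hdrop' (by omega) (by omega) hs hstart (by simpa using hlk)]

-- A's value in closed form
theorem A_closed (p0 : Int) (rest : List Int) (skip : Int) :
    trimPosList (p0 :: rest) skip
      = if 0 > skip then (p0, p0) :: segs skip p0 p0 rest else segs skip p0 p0 rest := by
  show (let s := (p0 :: rest).foldl _ ([], p0, p0); s.1 ++ [(s.2.2, s.2.1)]) = _
  rw [List.foldl_cons]
  by_cases h : p0 - p0 > skip
  · simp only [if_pos h]
    rw [A_fold]
    have h0 : 0 > skip := by omega
    simp [if_pos h0]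
  · simp only [if_neg h]
    rw [A_fold]
    have h0 : ¬ 0 > skip := by omega
    simp [if_neg h0]

-- B's value in closed form
theorem B_closed (p0 : Int) (rest : List Int) (skip : Int) :
    trimPosList_alt (p0 :: rest) skip = segs skip p0 p0 rest := by
  show (PySem.List.pyRange 0 _ 1).map _ = _
  rw [PySem.List.foldl_append_ite_eq_filter]
  have hfilt := filter_pyRange (p0 :: rest) skip rest 1 p0 (by simp) (by omega) (by simp)
  simp only [Nat.cast_one] at hfilt
  rw [hfilt, mapRange]
  have := core (p0 :: rest) skip rest 1 0 p0 p0 (by simp) (by omega) (by simp) (by simp)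
    (by simp) (by simp)
  simpa using this

-- ===== VERDICT (by name: the statement is the Claim_ definition above) =====
theorem trimPosList_spec : Claim_unchanged_trimPosList := by
  intro lst skip _ hpre hnd
  match lst with
  | [] => exact absurd rfl hpre
  | p0 :: rest =>
    have hskip : ¬ 0 > skip := by
      intro h
      exact hnd ⟨List.cons_ne_nil _ _, by omega⟩
    rw [A_closed, if_neg hskip, B_closed]

theorem trimPosList_changed : Claim_changed_trimPosList := by
  unfold Claim_changed_trimPosList; decide

theorem trimPosList_tight : Claim_exact_trimPosList := by
  intro lst skip _ _ hd
  match lst with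
  | [] => exact absurd rfl hd.1
  | p0 :: rest =>
    obtain ⟨-, hneg⟩ := hd
    rw [A_closed, if_pos (show (0 : Int) > skip by omega), B_closed]
    exact List.cons_ne_self _ _
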